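-- pv_equiv track=rewrite | github.com/Elijah-Huang/Competitive-Programming | Problems/Codeforces/Division 2/600's/683/E. Xor Tree.py | largest_good
-- ===== SOURCE A (Python) =====
-- def largest_good(a):
--     if len(a) <= 3:
--         return len(a)
--
--     mx = max(a)
--     cutoff = 1
--     while 2*cutoff <= mx:
--         cutoff*=2
--     s0 = []
--     s1 = []
--     for i in a:
--         if i < cutoff:
--             s0.append(i)
--         else:
--             s1.append(i)
--
--     if s0 and s1:
--         return 1 + max(largest_good(s0),largest_good(s1))
--     else:
--         s1 = [i - cutoff for i in s1]
--         return largest_good(s1)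
-- ===== SOURCE B (Python) =====
-- def largest_good(a):
--     s = sorted(a)
--
--     def first_ge(lo, hi, x):
--         # first index i in [lo, hi) with s[i] >= x, else hi (s sorted)
--         while lo < hi:
--             mid = (lo + hi) // 2
--             if s[mid] < x:
--                 lo = mid + 1
--             else:
--                 hi = mid
--         return lo
--
--     def f(lo, hi, base):
--         if hi - lo <= 3:
--             return hi - lo
--         mx = s[hi - 1] - base
--         cutoff = 1
--         while 2 * cutoff <= mx:
--             cutoff *= 2
--         split = first_ge(lo, hi, base + cutoff)
--         if lo < split < hi:
--             return 1 + max(f(lo, split, base), f(split, hi, base))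
--         return f(split, hi, base + cutoff)
--
--     return f(0, len(s), 0)
-- ===== Notes on version B (the rewrite author's own statement) =====
-- stated objective: faster
-- what changed: B sorts the list once and recurses on index ranges [lo,hi) of the sorted array with an accumulated base offset, finding the split point by binary search and the maximum as the last element of the range, instead of A's per-level list partitioning copies and full max() scans.
import Mathlib
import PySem

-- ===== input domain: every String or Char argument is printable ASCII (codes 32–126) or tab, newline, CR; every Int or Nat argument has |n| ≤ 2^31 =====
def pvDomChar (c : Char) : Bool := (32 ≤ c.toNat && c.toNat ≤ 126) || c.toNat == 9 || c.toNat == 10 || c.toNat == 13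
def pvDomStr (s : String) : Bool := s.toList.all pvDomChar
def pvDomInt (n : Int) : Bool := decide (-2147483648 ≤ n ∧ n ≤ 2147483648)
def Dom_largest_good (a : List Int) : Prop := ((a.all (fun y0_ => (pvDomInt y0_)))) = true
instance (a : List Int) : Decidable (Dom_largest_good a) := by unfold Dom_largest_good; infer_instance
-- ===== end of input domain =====

-- B sorts the list once and recurses on index ranges of the sorted array (binary-searched
-- split point, accumulated base offset) where A copies sub-lists and re-scans for the max
-- at every level; same return value on every input (objective: faster, constant-factor).

-- ===== PORT A =====
-- helpers and the lemmas the ports cite in their termination proofs (decreasing_by);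
-- each decreasing_by is a single lemma application to keep the definition bodies small

theorem lgCutoff_dec {mx c : Int} (h : 0 < c ∧ 2 * c ≤ mx) :
    (mx - 2 * c).toNat < (mx - c).toNat := by omega

def lgCutoff (mx c : Int) : Int :=
  if _h : 0 < c ∧ 2 * c ≤ mx then lgCutoff mx (2 * c) else c
termination_by (mx - c).toNat
decreasing_by exact lgCutoff_dec _h

theorem lgCutoff_pos (mx c : Int) : 0 < c → 0 < lgCutoff mx c := by
  fun_induction lgCutoff mx c with
  | case1 c' h ih => intro hc; exact ih (by omega)
  | case2 c' h => intro hc; exact hc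

def lgMaxD (l : List Int) : Int := (PySem.List.max? l (fun y => y)).getD 0
def lgMeasure (l : List Int) : Nat := l.length + (lgMaxD l).toNat

theorem lgMaxD_mem (l : List Int) (h : l ≠ []) : lgMaxD l ∈ l := by
  cases h' : PySem.List.max? l (fun y => y) with
  | none => exact absurd ((PySem.List.max?_eq_none_iff l _).mp h') h
  | some m => simpa [lgMaxD, h'] using PySem.List.max?_mem h'

theorem lgMaxD_ge (l : List Int) : ∀ x ∈ l, x ≤ lgMaxD l := by
  intro x hx
  cases h' : PySem.List.max? l (fun y => y) with
  | none => exact absurd ((PySem.List.max?_eq_none_iff l _).mp h') (List.ne_nil_of_mem hx)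
  | some m => simpa [lgMaxD, h'] using PySem.List.max?_isMax h' x hx

theorem lgMaxD_eq (l : List Int) (m : Int) (h1 : m ∈ l) (h2 : ∀ x ∈ l, x ≤ m) :
    lgMaxD l = m :=
  le_antisymm (h2 _ (lgMaxD_mem l (List.ne_nil_of_mem h1))) (lgMaxD_ge l m h1)

def lgPartition (c : Int) (l : List Int) : List Int × List Int :=
  l.foldl (fun s01 i => if i < c then (s01.1 ++ [i], s01.2) else (s01.1, s01.2 ++ [i])) ([], [])

theorem lgPartAux (c : Int) : ∀ (l s0 s1 : List Int),
    l.foldl (fun s01 i => if i < c then (s01.1 ++ [i], s01.2) else (s01.1, s01.2 ++ [i])) (s0, s1)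
      = (s0 ++ l.filter (fun i => decide (i < c)), s1 ++ l.filter (fun i => !decide (i < c))) := by
  intro l
  induction l with
  | nil => simp
  | cons i t ih =>
    intro s0 s1
    by_cases hi : i < c <;> simp [List.filter, hi, ih]

theorem lgPart (c : Int) (l : List Int) :
    lgPartition c l = (l.filter (fun i => decide (i < c)), l.filter (fun i => !decide (i < c))) := by
  simpa using lgPartAux c l [] []

theorem lgMeasure_split (a : List Int) (c : Int)
    (h1 : a.filter (fun i => decide (i < c)) ≠ [])
    (h2 : a.filter (fun i => !decide (i < c)) ≠ []) :
    lgMeasure (a.filter (fun i => decide (i < c))) < lgMeasure a ∧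
    lgMeasure (a.filter (fun i => !decide (i < c))) < lgMeasure a := by
  have key : ∀ p : Int → Bool, a.filter p ≠ [] → (a.filter (fun i => !p i)) ≠ [] →
      lgMeasure (a.filter p) < lgMeasure a := by
    intro p hp hq
    obtain ⟨y, hy⟩ := List.exists_mem_of_ne_nil _ hq
    have hya : y ∈ a := List.mem_of_mem_filter hy
    have hyp : ¬ p y = true := by
      have := List.of_mem_filter hy; simpa using this
    have hlen : (a.filter p).length < a.length :=
      List.length_filter_lt_length_iff_exists.mpr ⟨y, hya, hyp⟩
    have hmax : lgMaxD (a.filter p) ≤ lgMaxD a :=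
      lgMaxD_ge a _ (List.mem_of_mem_filter (lgMaxD_mem _ hp))
    have : (lgMaxD (a.filter p)).toNat ≤ (lgMaxD a).toNat := by omega
    unfold lgMeasure; omega
  refine ⟨key _ h1 (by simpa using h2), ?_⟩
  have := key (fun i => !decide (i < c)) h2 (by simpa using h1)
  simpa using this

theorem lgMeasure_shift (a : List Int) (c : Int) (hc : 0 < c) (h4 : ¬ a.length ≤ 3)
    (hp : ¬ (a.filter (fun i => decide (i < c)) ≠ [] ∧ a.filter (fun i => !decide (i < c)) ≠ [])) :
    lgMeasure ((a.filter (fun i => !decide (i < c))).map (fun i => i - c)) < lgMeasure a := by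
  by_cases h2 : a.filter (fun i => !decide (i < c)) = []
  · rw [h2]
    have : lgMaxD ([] : List Int) = 0 := by simp [lgMaxD, PySem.List.max?]
    simp [lgMeasure, this]; omega
  · have h1 : a.filter (fun i => decide (i < c)) = [] := by tauto
    have hall : ∀ x ∈ a, c ≤ x := by
      intro x hx
      have := List.filter_eq_nil_iff.mp h1 x hx
      simpa using this
    have heq : a.filter (fun i => !decide (i < c)) = a :=
      List.filter_eq_self.mpr (fun x hx => by simpa using hall x hx)
    rw [heq]
    have hne : a ≠ [] := by intro h; rw [h] at h4; simp at h4
    have hmem := lgMaxD_mem a hne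
    have hcm : c ≤ lgMaxD a := hall _ hmem
    have hmap : lgMaxD (a.map (fun i => i - c)) = lgMaxD a - c := by
      apply lgMaxD_eq
      · exact List.mem_map.mpr ⟨lgMaxD a, hmem, rfl⟩
      · intro y hy
        obtain ⟨x, hx, rfl⟩ := List.mem_map.mp hy
        have := lgMaxD_ge a x hx; omega
    unfold lgMeasure
    rw [hmap, List.length_map]
    omega

theorem lg_dec1 (a : List Int) (c : Int)
    (hp : (lgPartition c a).1 ≠ [] ∧ (lgPartition c a).2 ≠ []) :
    lgMeasure (lgPartition c a).1 < lgMeasure a := by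
  rw [lgPart] at hp ⊢; exact (lgMeasure_split a c hp.1 hp.2).1

theorem lg_dec2 (a : List Int) (c : Int)
    (hp : (lgPartition c a).1 ≠ [] ∧ (lgPartition c a).2 ≠ []) :
    lgMeasure (lgPartition c a).2 < lgMeasure a := by
  rw [lgPart] at hp ⊢; exact (lgMeasure_split a c hp.1 hp.2).2

theorem lg_dec3 (a : List Int) (c : Int) (hc : 0 < c) (h3 : ¬ a.length ≤ 3)
    (hp : ¬ ((lgPartition c a).1 ≠ [] ∧ (lgPartition c a).2 ≠ [])) :
    lgMeasure ((lgPartition c a).2.map (fun i => i - c)) < lgMeasure a := by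
  rw [lgPart] at hp ⊢
  exact lgMeasure_shift a c hc h3 (by simpa using hp)

def largest_good (a : List Int) : Int :=
  if _h3 : a.length ≤ 3 then (a.length : Int)
  else
    let mx := lgMaxD a
    let cutoff := lgCutoff mx 1
    let p := lgPartition cutoff a
    if _hp : p.1 ≠ [] ∧ p.2 ≠ [] then
      1 + max (largest_good p.1) (largest_good p.2)
    else
      largest_good (p.2.map (fun i => i - cutoff))
termination_by lgMeasure a
decreasing_by
  · exact lg_dec1 a _ _hp
  · exact lg_dec2 a _ _hp
  · exact lg_dec3 a _ (lgCutoff_pos _ _ one_pos) _h3 _hp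

-- ===== PORT B =====

theorem lgSearch_dec1 {lo hi : Int} (h : lo < hi) :
    (hi - (PySem.Int.floordiv (lo + hi) 2 + 1)).toNat < (hi - lo).toNat := by
  have := PySem.Int.floordiv_two_mid_bounds (le_of_lt h); omega

theorem lgSearch_dec2 {lo hi : Int} (h : lo < hi) :
    (PySem.Int.floordiv (lo + hi) 2 - lo).toNat < (hi - lo).toNat := by
  have h1 := PySem.Int.floordiv_two_mid_bounds (le_of_lt h)
  have h2 := (PySem.Int.floordiv_lt_iff_lt_mul (a := lo + hi) (b := 2) (q := hi) (by norm_num)).mpr (by omega)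
  omega

-- binary search (Source B's first_ge): first index in [lo, hi) with value ≥ x, else hi.
-- Out-of-range reads default to 0; with 0 ≤ lo ≤ hi ≤ len they never occur.
def lgSearch (s : List Int) (lo hi x : Int) : Int :=
  if _h : lo < hi then
    let mid := PySem.Int.floordiv (lo + hi) 2
    if PySem.List.pyGetD s mid 0 < x then lgSearch s (mid + 1) hi x
    else lgSearch s lo mid x
  else lo
termination_by (hi - lo).toNat
decreasing_by
  · exact lgSearch_dec1 _h
  · exact lgSearch_dec2 _h

theorem lgSearch_bounds (s : List Int) (x : Int) : ∀ lo hi : Int, lo ≤ hi →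
    lo ≤ lgSearch s lo hi x ∧ lgSearch s lo hi x ≤ hi := by
  intro lo hi
  fun_induction lgSearch s lo hi x with
  | case1 lo hi h mid hc ih =>
    intro _
    have hb := PySem.Int.floordiv_two_mid_bounds (le_of_lt h)
    have h2 := (PySem.Int.floordiv_lt_iff_lt_mul (a := lo + hi) (b := 2) (q := hi) (by norm_num)).mpr (by omega)
    have := ih (by simp only [mid] at *; omega)
    simp only [mid] at *; omega
  | case2 lo hi h mid hc ih =>
    intro _
    have hb := PySem.Int.floordiv_two_mid_bounds (le_of_lt h)
    have := ih (by simp only [mid] at *; omega)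
    simp only [mid] at *; omega
  | case3 lo hi h => intro h'; omega

theorem lgF_decN {lo r hi : Int} (h1 : lo < r) (h2 : r < hi) :
    (r - lo).toNat < (hi - lo).toNat := by omega

theorem lgF_decN2 {lo r hi : Int} (h1 : lo < r) (h2 : r < hi) :
    (hi - r).toNat < (hi - lo).toNat := by omega

theorem lgF_dec3 (s : List Int) (lo hi base : Int) (h3 : ¬ hi - lo ≤ 3)
    (hg : lgSearch s lo hi (base + lgCutoff (PySem.List.pyGetD s (hi - 1) 0 - base) 1) = hi ∨
          1 ≤ PySem.List.pyGetD s (hi - 1) 0 - base) :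
    Prod.Lex (· < ·) (· < ·)
      ((hi - lgSearch s lo hi (base + lgCutoff (PySem.List.pyGetD s (hi - 1) 0 - base) 1)).toNat,
       (PySem.List.pyGetD s (hi - 1) 0 - (base + lgCutoff (PySem.List.pyGetD s (hi - 1) 0 - base) 1)).toNat)
      ((hi - lo).toNat, (PySem.List.pyGetD s (hi - 1) 0 - base).toNat) := by
  have hb := lgSearch_bounds s (base + lgCutoff (PySem.List.pyGetD s (hi - 1) 0 - base) 1) lo hi (by omega)
  have hc := lgCutoff_pos (PySem.List.pyGetD s (hi - 1) 0 - base) 1 one_pos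
  rcases hg with hg | hg
  · exact Prod.Lex.left _ _ (by omega)
  · rcases eq_or_lt_of_le hb.1 with heq | hlt
    · have he : (hi - lgSearch s lo hi (base + lgCutoff (PySem.List.pyGetD s (hi - 1) 0 - base) 1)).toNat
          = (hi - lo).toNat := by omega
      rw [he]; exact Prod.Lex.right _ (by omega)
    · exact Prod.Lex.left _ _ (by omega)

-- Source B's f: recursion on the index range [lo, hi) of the sorted array s with bit base `base`.
-- The `split = hi ∨ 1 ≤ mx` disjunct below only makes the recursion total: it holds whenever
-- s is sorted (proved in lgGuard/lgF_eq below), which is the case at every actual call.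
def lgF (s : List Int) (lo hi base : Int) : Int :=
  if _h3 : hi - lo ≤ 3 then hi - lo
  else
    let mx := PySem.List.pyGetD s (hi - 1) 0 - base
    let cutoff := lgCutoff mx 1
    let split := lgSearch s lo hi (base + cutoff)
    if _hsp : lo < split ∧ split < hi then
      1 + max (lgF s lo split base) (lgF s split hi base)
    else if _hg : split = hi ∨ 1 ≤ mx then
      lgF s split hi (base + cutoff)
    else 0
termination_by ((hi - lo).toNat, (PySem.List.pyGetD s (hi - 1) 0 - base).toNat)
decreasing_by
  · exact Prod.Lex.left _ _ (lgF_decN _hsp.1 _hsp.2)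
  · exact Prod.Lex.left _ _ (lgF_decN2 _hsp.1 _hsp.2)
  · exact lgF_dec3 s lo hi base _h3 _hg

def largest_good_alt (a : List Int) : Int :=
  let s := PySem.List.sorted a (fun y => y) false
  lgF s 0 (s.length : Int) 0

-- ===== PRECONDITION & SPEC =====
def Spec_largest_good (a : List Int) (out : Int) : Prop := out = largest_good_alt a
instance (a : List Int) (out : Int) : Decidable (Spec_largest_good a out) := by unfold Spec_largest_good; infer_instance

-- ===== CLAIM (what is proved, stated in full; the proofs are below) =====
def Claim_equal_largest_good : Prop := ∀ (a : List Int), Dom_largest_good a → Spec_largest_good a (largest_good a)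

-- ===== LEMMAS AND PROOFS =====

theorem lg_perm : ∀ (n : Nat) (l l' : List Int), lgMeasure l ≤ n → l.Perm l' →
    largest_good l = largest_good l' := by
  intro n
  induction n with
  | zero =>
    intro l l' hm hp
    have h0 : l.length = 0 := by unfold lgMeasure at hm; omega
    have h0' : l'.length = 0 := by rw [← hp.length_eq]; exact h0
    rw [List.length_eq_zero_iff] at h0 h0'
    rw [h0, h0']
  | succ n ih =>
    intro l l' hm hp
    have hlen := hp.length_eq
    by_cases h3 : l.length ≤ 3
    · rw [largest_good, largest_good, dif_pos h3, dif_pos (hlen ▸ h3), hlen]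
    · have h3' : ¬ l'.length ≤ 3 := hlen ▸ h3
      have hne : l ≠ [] := by intro e; rw [e] at h3; simp at h3
      have hne' : l' ≠ [] := by intro e; rw [e] at h3'; simp at h3'
      have hmax : lgMaxD l' = lgMaxD l := by
        apply lgMaxD_eq
        · exact hp.mem_iff.mp (lgMaxD_mem l hne)
        · intro x hx; exact lgMaxD_ge l x (hp.mem_iff.mpr hx)
      rw [largest_good, largest_good, dif_neg h3, dif_neg h3']
      simp only [lgPart, hmax]
      set c := lgCutoff (lgMaxD l) 1 with hc
      have hperm1 : (l.filter (fun i => decide (i < c))).Perm (l'.filter (fun i => decide (i < c))) :=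
        hp.filter _
      have hperm2 : (l.filter (fun i => !decide (i < c))).Perm (l'.filter (fun i => !decide (i < c))) :=
        hp.filter _
      have e1 : (l.filter (fun i => decide (i < c)) ≠ []) ↔ (l'.filter (fun i => decide (i < c)) ≠ []) := by
        constructor
        · intro hh he
          exact hh (List.length_eq_zero_iff.mp (by rw [hperm1.length_eq, he, List.length_nil]))
        · intro hh he
          exact hh (List.length_eq_zero_iff.mp (by rw [← hperm1.length_eq, he, List.length_nil]))
      have e2 : (l.filter (fun i => !decide (i < c)) ≠ []) ↔ (l'.filter (fun i => !decide (i < c)) ≠ []) := by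
        constructor
        · intro hh he
          exact hh (List.length_eq_zero_iff.mp (by rw [hperm2.length_eq, he, List.length_nil]))
        · intro hh he
          exact hh (List.length_eq_zero_iff.mp (by rw [← hperm2.length_eq, he, List.length_nil]))
      by_cases hb : l.filter (fun i => decide (i < c)) ≠ [] ∧ l.filter (fun i => !decide (i < c)) ≠ []
      · rw [dif_pos hb, dif_pos ⟨e1.mp hb.1, e2.mp hb.2⟩]
        have hs := lgMeasure_split l c hb.1 hb.2
        rw [ih _ _ (Nat.lt_succ_iff.mp (lt_of_lt_of_le hs.1 hm)) hperm1, ih _ _ (Nat.lt_succ_iff.mp (lt_of_lt_of_le hs.2 hm)) hperm2]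
      · rw [dif_neg hb, dif_neg (by rw [← e1, ← e2] at *; exact hb)]
        have hsh := lgMeasure_shift l c (lgCutoff_pos _ _ one_pos) h3 hb
        exact ih _ _ (Nat.lt_succ_iff.mp (lt_of_lt_of_le hsh hm)) (hperm2.map _)

theorem lgSearch_spec (s : List Int) (x : Int)
    (hmono : ∀ p q : Nat, p ≤ q → q < s.length → s.getD p 0 ≤ s.getD q 0) :
    ∀ lo hi : Int, 0 ≤ lo → hi ≤ (s.length : Int) →
    (∀ i : Nat, lo.toNat ≤ i → i < (lgSearch s lo hi x).toNat → s.getD i 0 < x) ∧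
    (∀ i : Nat, (lgSearch s lo hi x).toNat ≤ i → i < hi.toNat → x ≤ s.getD i 0) := by
  intro lo hi
  fun_induction lgSearch s lo hi x with
  | case1 lo hi h mid hc ih =>
    intro h0 hhi
    have hb := PySem.Int.floordiv_two_mid_bounds (le_of_lt h)
    have h2 := (PySem.Int.floordiv_lt_iff_lt_mul (a := lo + hi) (b := 2) (q := hi) (by norm_num)).mpr (by omega)
    have hmid0 : (0:Int) ≤ mid := by simp only [mid] at *; omega
    have hmidlen : mid < (s.length : Int) := by simp only [mid] at *; omega
    have hcd : s.getD mid.toNat 0 < x := by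
      rw [PySem.List.pyGetD_eq_getElem s 0 hmid0 hmidlen] at hc
      rwa [List.getD_eq_getElem s 0 (by omega)]
    obtain ⟨A1, A2⟩ := ih (by omega) hhi
    have hbnd := lgSearch_bounds s x (mid + 1) hi (by simp only [mid] at *; omega)
    constructor
    · intro i hli hir
      by_cases hcase : (mid + 1).toNat ≤ i
      · exact A1 i hcase hir
      · have hi_le : i ≤ mid.toNat := by omega
        have hilen : mid.toNat < s.length := by omega
        exact lt_of_le_of_lt (hmono i mid.toNat hi_le hilen) hcd
    · exact A2
  | case2 lo hi h mid hc ih =>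
    intro h0 hhi
    have hb := PySem.Int.floordiv_two_mid_bounds (le_of_lt h)
    have h2 := (PySem.Int.floordiv_lt_iff_lt_mul (a := lo + hi) (b := 2) (q := hi) (by norm_num)).mpr (by omega)
    have hmid0 : (0:Int) ≤ mid := by simp only [mid] at *; omega
    have hmidlen : mid < (s.length : Int) := by simp only [mid] at *; omega
    have hcd : x ≤ s.getD mid.toNat 0 := by
      rw [PySem.List.pyGetD_eq_getElem s 0 hmid0 hmidlen] at hc
      rw [not_lt] at hc
      rwa [List.getD_eq_getElem s 0 (by omega)]
    obtain ⟨A1, A2⟩ := ih h0 (by omega)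
    have hbnd := lgSearch_bounds s x lo mid (by simp only [mid] at *; omega)
    constructor
    · exact A1
    · intro i hri hih
      by_cases hcase : i < mid.toNat
      · exact A2 i hri hcase
      · have hilen : i < s.length := by omega
        exact le_trans hcd (hmono mid.toNat i (by omega) hilen)
  | case3 lo hi h =>
    intro h0 hhi
    exact ⟨fun i h1 h2 => absurd h2 (by omega), fun i h1 h2 => absurd h2 (by omega)⟩

theorem segLen (s : List Int) (L K : Nat) (hK : L + K ≤ s.length) :
    ((s.drop L).take K).length = K := by
  simp [List.length_take, List.length_drop]; omega

theorem segGet (s : List Int) (L K k : Nat) (hk : k < K) (hK : L + K ≤ s.length) :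
    ((s.drop L).take K).getD k 0 = s.getD (L + k) 0 := by
  have h1 : k < ((s.drop L).take K).length := by rw [segLen s L K hK]; exact hk
  have h2 : L + k < s.length := by omega
  rw [List.getD_eq_getElem _ _ h1, List.getD_eq_getElem _ _ h2]
  rw [List.getElem_take, List.getElem_drop]

theorem segMem (s : List Int) (L K : Nat) (hK : L + K ≤ s.length) (y : Int) :
    y ∈ (s.drop L).take K ↔ ∃ k, k < K ∧ y = s.getD (L + k) 0 := by
  rw [List.mem_iff_getElem]
  constructor
  · rintro ⟨k, hk, rfl⟩
    have hk' : k < K := by rw [segLen s L K hK] at hk; exact hk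
    refine ⟨k, hk', ?_⟩
    rw [← segGet s L K k hk' hK, List.getD_eq_getElem _ _ hk]
  · rintro ⟨k, hk, rfl⟩
    have hk' : k < ((s.drop L).take K).length := by rw [segLen s L K hK]; exact hk
    refine ⟨k, hk', ?_⟩
    rw [← segGet s L K k hk hK, List.getD_eq_getElem _ _ hk']

theorem segSplit (s : List Int) (L R H : Nat) (h1 : L ≤ R) (h2 : R ≤ H) :
    (s.drop L).take (H - L) = (s.drop L).take (R - L) ++ ((s.drop R).take (H - R)) := by
  have he : H - L = (R - L) + (H - R) := by omega
  rw [he, List.take_add]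
  congr 1
  rw [List.drop_drop]
  congr 2
  omega

theorem lgA_step (s : List Int)
    (hmono : ∀ p q : Nat, p ≤ q → q < s.length → s.getD p 0 ≤ s.getD q 0)
    (lo hi base mx c r : Int)
    (h0 : 0 ≤ lo) (hlh : lo ≤ hi) (hhl : hi ≤ (s.length : Int)) (h3 : ¬ hi - lo ≤ 3)
    (hmx : mx = PySem.List.pyGetD s (hi - 1) 0 - base)
    (hcc : c = lgCutoff mx 1)
    (hr : r = lgSearch s lo hi (base + c)) :
    largest_good (((s.drop lo.toNat).take (hi.toNat - lo.toNat)).map (fun y => y - base)) =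
      if lo < r ∧ r < hi then
        1 + max (largest_good (((s.drop lo.toNat).take (r.toNat - lo.toNat)).map (fun y => y - base)))
                (largest_good (((s.drop r.toNat).take (hi.toNat - r.toNat)).map (fun y => y - base)))
      else
        largest_good (((s.drop r.toNat).take (hi.toNat - r.toNat)).map (fun y => y - (base + c))) := by
  have hrb := hr ▸ lgSearch_bounds s (base + c) lo hi hlh
  have hspec := hr ▸ (lgSearch_spec s (base + c) hmono lo hi h0 hhl)
  obtain ⟨S1, S2⟩ := hspec
  have hge : s.getD ((hi - 1).toNat) 0 = s.getD (hi.toNat - 1) 0 := by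
    congr 1; omega
  have hmx' : mx = s.getD (hi.toNat - 1) 0 - base := by
    rw [hmx, PySem.List.pyGetD_eq_getElem s 0 (by omega) (by omega),
        ← List.getD_eq_getElem s 0 (by omega)]
    rw [hge]
  have hcpos : 0 < c := hcc ▸ lgCutoff_pos mx 1 one_pos
  -- abbreviations
  have hLH : lo.toNat ≤ hi.toNat := by omega
  have hHlen : hi.toNat ≤ s.length := by omega
  have hLR : lo.toNat ≤ r.toNat := by omega
  have hRH : r.toNat ≤ hi.toNat := by omega
  have h4 : 4 ≤ hi.toNat - lo.toNat := by omega
  have hKseg : lo.toNat + (hi.toNat - lo.toNat) ≤ s.length := by omega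
  have hKA : lo.toNat + (r.toNat - lo.toNat) ≤ s.length := by omega
  have hKB : r.toNat + (hi.toNat - r.toNat) ≤ s.length := by omega
  -- max of the shifted segment
  have hmaxeq : lgMaxD (((s.drop lo.toNat).take (hi.toNat - lo.toNat)).map (fun y => y - base)) = mx := by
    rw [hmx']
    apply lgMaxD_eq
    · apply List.mem_map.mpr
      refine ⟨s.getD (hi.toNat - 1) 0, ?_, rfl⟩
      rw [segMem s _ _ hKseg]
      exact ⟨hi.toNat - 1 - lo.toNat, by omega, by congr 1; omega⟩
    · intro y hy
      obtain ⟨z, hz, rfl⟩ := List.mem_map.mp hy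
      obtain ⟨k, hk, rfl⟩ := (segMem s _ _ hKseg z).mp hz
      have := hmono (lo.toNat + k) (hi.toNat - 1) (by omega) (by omega)
      omega
  -- the two filters are the two sub-segments
  have hsplitseg := segSplit s lo.toNat r.toNat hi.toNat hLR hRH
  have hAall : ∀ y ∈ ((s.drop lo.toNat).take (r.toNat - lo.toNat)).map (fun y => y - base),
      decide (y < c) = true := by
    intro y hy
    obtain ⟨z, hz, rfl⟩ := List.mem_map.mp hy
    obtain ⟨k, hk, rfl⟩ := (segMem s _ _ hKA z).mp hz
    have := S1 (lo.toNat + k) (by omega) (by omega)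
    rw [decide_eq_true_iff]; omega
  have hBall : ∀ y ∈ ((s.drop r.toNat).take (hi.toNat - r.toNat)).map (fun y => y - base),
      (!decide (y < c)) = true := by
    intro y hy
    obtain ⟨z, hz, rfl⟩ := List.mem_map.mp hy
    obtain ⟨k, hk, rfl⟩ := (segMem s _ _ hKB z).mp hz
    have := S2 (r.toNat + k) (by omega) (by omega)
    simp only [Bool.not_eq_true', decide_eq_false_iff_not]; omega
  have hp1 : (((s.drop lo.toNat).take (hi.toNat - lo.toNat)).map (fun y => y - base)).filter
        (fun i => decide (i < c))
      = ((s.drop lo.toNat).take (r.toNat - lo.toNat)).map (fun y => y - base) := by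
    rw [hsplitseg, List.map_append, List.filter_append,
        List.filter_eq_self.mpr hAall,
        List.filter_eq_nil_iff.mpr (fun y hy => by simpa using hBall y hy),
        List.append_nil]
  have hp2 : (((s.drop lo.toNat).take (hi.toNat - lo.toNat)).map (fun y => y - base)).filter
        (fun i => !decide (i < c))
      = ((s.drop r.toNat).take (hi.toNat - r.toNat)).map (fun y => y - base) := by
    rw [hsplitseg, List.map_append, List.filter_append,
        List.filter_eq_nil_iff.mpr (fun y hy => by simpa using hAall y hy),
        List.filter_eq_self.mpr hBall,
        List.nil_append]
  have hlenA : (((s.drop lo.toNat).take (r.toNat - lo.toNat)).map (fun y => y - base)).length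
      = r.toNat - lo.toNat := by
    rw [List.length_map, segLen s _ _ hKA]
  have hlenB : (((s.drop r.toNat).take (hi.toNat - r.toNat)).map (fun y => y - base)).length
      = hi.toNat - r.toNat := by
    rw [List.length_map, segLen s _ _ hKB]
  have hlenSeg : (((s.drop lo.toNat).take (hi.toNat - lo.toNat)).map (fun y => y - base)).length
      = hi.toNat - lo.toNat := by
    rw [List.length_map, segLen s _ _ hKseg]
  -- unfold A one step
  conv_lhs => rw [largest_good]
  rw [dif_neg (by omega : ¬ (((s.drop lo.toNat).take (hi.toNat - lo.toNat)).map (fun y => y - base)).length ≤ 3)]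
  simp only [lgPart, hmaxeq, ← hcc, hp1, hp2]
  by_cases hbr : lo < r ∧ r < hi
  · rw [if_pos hbr]
    have hne1 : ((s.drop lo.toNat).take (r.toNat - lo.toNat)).map (fun y => y - base) ≠ [] := by
      intro he; rw [he] at hlenA; simp at hlenA; omega
    have hne2 : ((s.drop r.toNat).take (hi.toNat - r.toNat)).map (fun y => y - base) ≠ [] := by
      intro he; rw [he] at hlenB; simp at hlenB; omega
    rw [dif_pos ⟨hne1, hne2⟩]
  · rw [if_neg hbr]
    have hbr' : ¬ (((s.drop lo.toNat).take (r.toNat - lo.toNat)).map (fun y => y - base) ≠ [] ∧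
        ((s.drop r.toNat).take (hi.toNat - r.toNat)).map (fun y => y - base) ≠ []) := by
      intro ⟨hne1, hne2⟩
      apply hbr
      constructor
      · rcases eq_or_lt_of_le hrb.1 with he | hlt
        · exfalso; apply hne1; apply List.eq_nil_of_length_eq_zero; rw [hlenA]; omega
        · exact hlt
      · rcases eq_or_lt_of_le hrb.2 with he | hlt
        · exfalso; apply hne2; apply List.eq_nil_of_length_eq_zero; rw [hlenB]; omega
        · exact hlt
    rw [dif_neg hbr']
    rw [List.map_map]
    congr 1
    apply List.map_congr_left
    intro y _
    simp only [Function.comp]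
    ring

theorem lgGuard (s : List Int)
    (hmono : ∀ p q : Nat, p ≤ q → q < s.length → s.getD p 0 ≤ s.getD q 0)
    (lo hi base mx c r : Int)
    (h0 : 0 ≤ lo) (hlh : lo ≤ hi) (hhl : hi ≤ (s.length : Int)) (h3 : ¬ hi - lo ≤ 3)
    (hmx : mx = PySem.List.pyGetD s (hi - 1) 0 - base)
    (hcc : c = lgCutoff mx 1)
    (hr : r = lgSearch s lo hi (base + c))
    (hsp : ¬ (lo < r ∧ r < hi)) :
    r = hi ∨ 1 ≤ mx := by
  have hrb := hr ▸ lgSearch_bounds s (base + c) lo hi hlh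
  obtain ⟨S1, S2⟩ := hr ▸ (lgSearch_spec s (base + c) hmono lo hi h0 hhl)
  have hcpos : 0 < c := hcc ▸ lgCutoff_pos mx 1 one_pos
  have hge : s.getD ((hi - 1).toNat) 0 = s.getD (hi.toNat - 1) 0 := by
    congr 1; omega
  have hmx' : mx = s.getD (hi.toNat - 1) 0 - base := by
    rw [hmx, PySem.List.pyGetD_eq_getElem s 0 (by omega) (by omega),
        ← List.getD_eq_getElem s 0 (by omega), hge]
  rcases eq_or_lt_of_le hrb.2 with he | hlt
  · exact Or.inl he
  · right
    have hrlo : r = lo := by omega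
    have hS := S2 lo.toNat (by omega) (by omega)
    have := hmono lo.toNat (hi.toNat - 1) (by omega) (by omega)
    omega

theorem lgF_eq (s : List Int)
    (hmono : ∀ p q : Nat, p ≤ q → q < s.length → s.getD p 0 ≤ s.getD q 0) :
    ∀ (lo hi base : Int), 0 ≤ lo → lo ≤ hi → hi ≤ (s.length : Int) →
    lgF s lo hi base
      = largest_good (((s.drop lo.toNat).take (hi.toNat - lo.toNat)).map (fun y => y - base)) := by
  intro lo hi base
  fun_induction lgF s lo hi base with
  | case1 lo hi base h3 =>
    intro h0 hlh hhl
    rw [largest_good]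
    have hlen : (((s.drop lo.toNat).take (hi.toNat - lo.toNat)).map (fun y => y - base)).length
        = hi.toNat - lo.toNat := by
      rw [List.length_map, segLen s _ _ (by omega)]
    rw [dif_pos (by omega : (((s.drop lo.toNat).take (hi.toNat - lo.toNat)).map (fun y => y - base)).length ≤ 3)]
    rw [hlen]
    omega
  | case2 lo hi base h3 mx cutoff split hsp ih1 ih2 =>
    intro h0 hlh hhl
    have hrb := lgSearch_bounds s (base + cutoff) lo hi hlh
    rw [lgA_step s hmono lo hi base mx cutoff split h0 hlh hhl h3 rfl rfl rfl]
    rw [if_pos hsp]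
    rw [ih1 h0 (by omega) (by omega), ih2 (by omega) (by omega) hhl]
  | case3 lo hi base h3 mx cutoff split hsp hg ih =>
    intro h0 hlh hhl
    have hrb := lgSearch_bounds s (base + cutoff) lo hi hlh
    rw [lgA_step s hmono lo hi base mx cutoff split h0 hlh hhl h3 rfl rfl rfl]
    rw [if_neg hsp]
    rw [ih (by omega) (by omega) hhl]
  | case4 lo hi base h3 mx cutoff split hsp hg =>
    intro h0 hlh hhl
    exact absurd (lgGuard s hmono lo hi base mx cutoff split h0 hlh hhl h3 rfl rfl rfl hsp) hg

-- ===== VERDICT (by name: the statement is the Claim_ definition above) =====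
theorem largest_good_spec : Claim_equal_largest_good := by
  intro a _
  unfold Spec_largest_good largest_good_alt
  have hmono : ∀ p q : Nat, p ≤ q → q < (PySem.List.sorted a (fun y => y) false).length →
      (PySem.List.sorted a (fun y => y) false).getD p 0 ≤ (PySem.List.sorted a (fun y => y) false).getD q 0 := by
    intro p q hpq hq
    rw [List.getD_eq_getElem _ _ (lt_of_le_of_lt hpq hq), List.getD_eq_getElem _ _ hq]
    exact PySem.List.sorted_id_getElem_mono a hpq hq
  have h := lgF_eq (PySem.List.sorted a (fun y => y) false) hmono 0
      ((PySem.List.sorted a (fun y => y) false).length : Int) 0 le_rfl (by positivity) le_rfl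
  simp only [Int.toNat_zero, Int.toNat_natCast, Nat.sub_zero, List.drop_zero, List.take_length,
    sub_zero, List.map_id'] at h
  rw [h]
  exact lg_perm (lgMeasure a) a _ le_rfl (PySem.List.sorted_perm a (fun y => y) false).symm
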